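-- pv_equiv track=rewrite | github.com/knutj42/square_8x8_puzzle | puzzle.py | strip_piece
-- ===== SOURCE A (Python) =====
-- def strip_piece(square_piece):
--     # strip off leading and trailing empty cols and rows
--     square_grid_size = len(square_piece)
--     empty_cols = []
--     for col in range(square_grid_size):
--         for row in range(square_grid_size):
--             if square_piece[row][col] != " ":
--                 break
--         else:
--             empty_cols.append(col)
--     empty_rows = []
--     for row in range(square_grid_size):
--         for col in range(square_grid_size):
--             if square_piece[row][col] != " ":
--                 break
--         else:
--             empty_rows.append(row)
--
--     stripped_piece = []
--     for row in range(square_grid_size):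
--         if row not in empty_rows:
--             stripped_piece.append([])
--             for col in range(square_grid_size):
--                 if col not in empty_cols:
--                     stripped_piece[-1].append(square_piece[row][col])
--     return stripped_piece
-- ===== SOURCE B (Python) =====
-- def strip_piece(square_piece):
--     # Filter out the blank rows, transpose the square grid by reading it
--     # column-major, filter out the blank rows of the transpose (= the original
--     # blank columns), and transpose back.
--     n = len(square_piece)
--     kept_rows = [row for row in square_piece
--                  if any(cell != " " for cell in row[:n])]
--     cols = [[row[c] for row in kept_rows] for c in range(n)]
--     kept_cols = [col for col in cols if any(cell != " " for cell in col)]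
--     return [[col[r] for col in kept_cols] for r in range(len(kept_rows))]
-- ===== Notes on version B (the rewrite author's own statement) =====
-- stated objective: simpler
-- what changed: A builds empty-row and empty-column index lists with two break/else scans and rebuilds cell by cell with 'not in' membership tests; B is a row-filter / transpose / row-filter / transpose pipeline: it drops blank rows, transposes the grid column-major, drops the blank rows of the transpose (the original blank columns), and transposes back.
import Mathlib
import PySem

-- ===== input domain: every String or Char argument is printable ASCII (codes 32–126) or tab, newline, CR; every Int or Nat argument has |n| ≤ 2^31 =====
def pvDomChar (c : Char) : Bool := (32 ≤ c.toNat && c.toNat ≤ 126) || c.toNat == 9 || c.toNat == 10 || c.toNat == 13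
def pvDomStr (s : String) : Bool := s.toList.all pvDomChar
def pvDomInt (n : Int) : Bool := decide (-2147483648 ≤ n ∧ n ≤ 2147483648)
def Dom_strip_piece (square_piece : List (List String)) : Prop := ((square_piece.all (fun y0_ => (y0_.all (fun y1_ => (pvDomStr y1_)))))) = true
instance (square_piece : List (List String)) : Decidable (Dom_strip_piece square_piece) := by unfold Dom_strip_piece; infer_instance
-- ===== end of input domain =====

-- B replaces A's empty-row/empty-col index scans and membership rebuild with a
-- row-filter / transpose / row-filter / transpose pipeline (return value only).

-- ===== PORT A =====
-- square_piece[row][col] (indices from range(n); in range under Pre_, where A never raises)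
def pvCell (g : List (List String)) (r c : Int) : String :=
  PySem.List.pyGetD (PySem.List.pyGetD g r []) c ""

-- inner 'for row in range(n): if cell != " ": break / else' of the empty-col scan
def pvColBlank (g : List (List String)) (col : Int) : List Int → Bool
  | [] => true
  | r :: rs => if pvCell g r col != " " then false else pvColBlank g col rs

-- inner 'for col in range(n): if cell != " ": break / else' of the empty-row scan
def pvRowBlank (g : List (List String)) (row : Int) : List Int → Bool
  | [] => true
  | c :: cs => if pvCell g row c != " " then false else pvRowBlank g row cs

def strip_piece (square_piece : List (List String)) : List (List String) :=
  let n : Int := PySem.List.len square_piece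
  let rng := PySem.List.pyRange 0 n 1
  let empty_cols : List Int :=
    rng.foldl (fun acc col => if pvColBlank square_piece col rng then acc ++ [col] else acc) []
  let empty_rows : List Int :=
    rng.foldl (fun acc row => if pvRowBlank square_piece row rng then acc ++ [row] else acc) []
  rng.foldl (fun acc row =>
    if empty_rows.contains row then acc
    else acc ++ [rng.foldl (fun racc col =>
      if empty_cols.contains col then racc
      else racc ++ [pvCell square_piece row col]) []]) []

-- ===== PORT B =====
def strip_piece_alt (square_piece : List (List String)) : List (List String) :=
  let n : Int := PySem.List.len square_piece
  let kept_rows : List (List String) :=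
    square_piece.filter
      (fun row => (PySem.List.slice row none (some n)).any (fun cell => cell != " "))
  -- row[c] (in range under Pre_, where B never raises)
  let cols : List (List String) :=
    (PySem.List.pyRange 0 n 1).map
      (fun c => kept_rows.map (fun row => PySem.List.pyGetD row c ""))
  let kept_cols : List (List String) :=
    cols.filter (fun col => col.any (fun cell => cell != " "))
  (PySem.List.pyRange 0 (PySem.List.len kept_rows) 1).map
    (fun r => kept_cols.map (fun col => PySem.List.pyGetD col r ""))

-- ===== PRECONDITION & SPEC =====
-- Pre_ is exactly the inputs on which A raises no IndexError: (1) every row shorter than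
-- the grid is non-blank (its scan breaks in time), (2) every column scan that would reach
-- a too-short row hits a non-blank cell first, (3) no kept cell lies beyond its row's end.
def Pre_strip_piece (square_piece : List (List String)) : Prop :=
  (∀ row ∈ square_piece, square_piece.length ≤ row.length ∨
      row.any (fun cell => cell != " ") = true) ∧
  (∀ c < square_piece.length, ∀ i < square_piece.length,
      (square_piece.getD i []).length ≤ c →
      ∃ j < i, c < (square_piece.getD j []).length ∧
        (square_piece.getD j []).getD c "" ≠ " ") ∧
  (∀ i < square_piece.length, ∀ c < square_piece.length,
      ((square_piece.getD i []).take square_piece.length).any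
          (fun cell => cell != " ") = true →
      (∃ j < square_piece.length, c < (square_piece.getD j []).length ∧
          (square_piece.getD j []).getD c "" ≠ " ") →
      c < (square_piece.getD i []).length)
instance (square_piece : List (List String)) : Decidable (Pre_strip_piece square_piece) := by
  unfold Pre_strip_piece
  refine @instDecidableAnd _ _ ?_ (@instDecidableAnd _ _ ?_ ?_) <;> infer_instance

def pvWitness_strip_piece : List (List String) := [["x", " "], [" ", " "]]

def Spec_strip_piece (square_piece : List (List String)) (out : List (List String)) : Prop := out = strip_piece_alt square_piece
instance (square_piece : List (List String)) (out : List (List String)) : Decidable (Spec_strip_piece square_piece out) := by unfold Spec_strip_piece; infer_instance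

-- ===== CLAIM (what is proved, stated in full; the proofs are below) =====
def Claim_equal_strip_piece : Prop := ∀ (square_piece : List (List String)), Dom_strip_piece square_piece → Pre_strip_piece square_piece → Spec_strip_piece square_piece (strip_piece square_piece)

-- ===== LEMMAS AND PROOFS =====

-- canonical range-indexed form that A computes on EVERY input (out-of-range reads encoded
-- as the default "", which is ≠ " ")
def pvQn (g : List (List String)) (row : List String) : Bool :=
  (List.range g.length).any (fun c => row.getD c "" != " ")

def pvRowKeepW (g : List (List String)) (r : Nat) : Bool := pvQn g (g.getD r [])

def pvKeepColW (g : List (List String)) (c : Nat) : Bool :=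
  (List.range g.length).any (fun r => (g.getD r []).getD c "" != " ")

def pvCanonW (g : List (List String)) : List (List String) :=
  ((List.range g.length).filter (pvRowKeepW g)).map
    (fun r => ((List.range g.length).filter (pvKeepColW g)).map
      (fun c => (g.getD r []).getD c ""))

lemma pvRng_eq (m : Nat) :
    PySem.List.pyRange 0 (m : Int) 1 = (List.range m).map (fun k => ((k : Nat) : Int)) := by
  rw [PySem.List.pyRange_one]; simp

lemma pvColBlank_eq_all (g : List (List String)) (col : Int) (rs : List Int) :
    pvColBlank g col rs = rs.all (fun r => pvCell g r col == " ") := by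
  induction rs with
  | nil => rfl
  | cons r rs ih =>
    simp only [pvColBlank, bne, List.all_cons, ih]
    cases h : pvCell g r col == " " <;> simp

lemma pvRowBlank_eq_all (g : List (List String)) (row : Int) (cs : List Int) :
    pvRowBlank g row cs = cs.all (fun c => pvCell g row c == " ") := by
  induction cs with
  | nil => rfl
  | cons c cs ih =>
    simp only [pvRowBlank, bne, List.all_cons, ih]
    cases h : pvCell g row c == " " <;> simp

lemma pvFilterMapRange {α : Type} (g : List α) (d : α) (p : α → Bool) :
    ((List.range g.length).filter (fun i => p (g.getD i d))).map (fun i => g.getD i d)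
      = g.filter p := by
  induction g with
  | nil => simp
  | cons a t ih =>
    have key : List.map ((fun i => (a :: t).getD i d) ∘ Nat.succ)
        (List.filter ((fun i => p ((a :: t).getD i d)) ∘ Nat.succ) (List.range t.length))
        = List.filter p t := by
      simpa [Function.comp] using ih
    simp only [List.length_cons, List.range_succ_eq_map, List.filter_cons, List.getD_cons_zero,
      List.filter_map]
    cases h : p a <;>
      simp only [Bool.false_eq_true, ite_true, ite_false, List.map_cons,
        List.getD_cons_zero, List.map_map, key]

lemma pvSelfMapRange {α : Type} (l : List α) (d : α) :
    (List.range l.length).map (fun i => l.getD i d) = l := by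
  induction l with
  | nil => simp
  | cons a t ih =>
    simp only [List.length_cons, List.range_succ_eq_map, List.map_cons, List.map_map,
      List.getD_cons_zero]
    refine congrArg (a :: ·) ?_
    simpa [Function.comp] using ih

lemma pvMapGetDRange {α β : Type} (l : List α) (d : α) (F : α → β) :
    (List.range l.length).map (fun i => F (l.getD i d)) = l.map F := by
  have : (List.range l.length).map (fun i => F (l.getD i d))
      = ((List.range l.length).map (fun i => l.getD i d)).map F := by
    rw [List.map_map]; rfl
  rw [this, pvSelfMapRange]

lemma pvAnyRange {α : Type} (g : List α) (d : α) (p : α → Bool) :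
    (List.range g.length).any (fun i => p (g.getD i d)) = g.any p := by
  induction g with
  | nil => simp
  | cons a t ih =>
    simp only [List.length_cons, List.range_succ_eq_map, List.any_cons, List.any_map,
      List.getD_cons_zero]
    rw [← ih]; rfl

lemma pvAnyCongr {α : Type} (l : List α) (f g : α → Bool) (h : ∀ x ∈ l, f x = g x) :
    l.any f = l.any g := by
  induction l with
  | nil => rfl
  | cons a t ih =>
    simp only [List.any_cons, h a (by simp), ih (fun x hx => h x (by simp [hx]))]

lemma pvFoldlSkip {α β : Type} (l : List α) (q : α → Bool) (f : α → β) :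
    l.foldl (fun acc x => if q x then acc else acc ++ [f x]) []
      = (l.filter (fun x => !q x)).map f := by
  have h1 := PySem.List.foldl_congr_mem (l := l) (init := ([] : List β))
      (f := fun acc x => if q x then acc else acc ++ [f x])
      (g := fun acc x => if !q x then acc ++ [f x] else acc)
      (by intro acc x _; cases h : q x <;> simp [h])
  exact h1.trans (by simpa using PySem.List.foldl_append_if (fun x => !q x) f l [])

lemma pvContainsFilter (l : List Int) (q : Int → Bool) (x : Int) (hx : x ∈ l) :
    ((l.filter q).contains x) = q x := by
  cases hqx : q x <;> simp [List.mem_filter, hx, hqx]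

lemma pvA_eq_canon (g : List (List String)) :
    strip_piece g = pvCanonW g := by
  have hrng : PySem.List.pyRange 0 (PySem.List.len g) 1
      = (List.range g.length).map (fun k => ((k : Nat) : Int)) := by
    rw [PySem.List.len_eq]; exact pvRng_eq g.length
  simp only [strip_piece, hrng, PySem.List.foldl_append_if_eq_filter, List.nil_append,
    pvFoldlSkip]
  have hcell : ∀ (r c : Nat), pvCell g (↑r) (↑c) = (g.getD r []).getD c "" := by
    intro r c; simp [pvCell]
  have hcol : (List.map (fun k : Nat => (↑k : Int)) (List.range g.length)).filter
        (fun x => !(List.filter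
            (fun x => pvColBlank g x (List.map (fun k : Nat => (↑k : Int)) (List.range g.length)))
            (List.map (fun k : Nat => (↑k : Int)) (List.range g.length))).contains x)
      = (List.map (fun k : Nat => (↑k : Int)) (List.range g.length)).filter
        (fun x => !pvColBlank g x (List.map (fun k : Nat => (↑k : Int)) (List.range g.length))) :=
    List.filter_congr (by intro x hx; rw [pvContainsFilter _ _ _ hx])
  have hrow : (List.map (fun k : Nat => (↑k : Int)) (List.range g.length)).filter
        (fun x => !(List.filter
            (fun x => pvRowBlank g x (List.map (fun k : Nat => (↑k : Int)) (List.range g.length)))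
            (List.map (fun k : Nat => (↑k : Int)) (List.range g.length))).contains x)
      = (List.map (fun k : Nat => (↑k : Int)) (List.range g.length)).filter
        (fun x => !pvRowBlank g x (List.map (fun k : Nat => (↑k : Int)) (List.range g.length))) :=
    List.filter_congr (by intro x hx; rw [pvContainsFilter _ _ _ hx])
  rw [hcol, hrow]
  simp only [List.filter_map, List.map_map]
  have hkeep : List.filter
        ((fun x => !pvColBlank g x (List.map (fun k : Nat => (↑k : Int)) (List.range g.length)))
          ∘ fun k : Nat => (↑k : Int)) (List.range g.length)
      = (List.range g.length).filter (pvKeepColW g) := by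
    refine List.filter_congr ?_
    intro c _
    show (!pvColBlank g (↑c) _) = pvKeepColW g c
    rw [pvColBlank_eq_all, List.all_map]
    have h2 : ((fun r => pvCell g r (↑c) == " ") ∘ fun k : Nat => (↑k : Int))
        = fun r : Nat => ((g.getD r []).getD c "" == " ") := by
      funext r; simp only [Function.comp, hcell]
    rw [h2, List.not_all_eq_any_not]
    rfl
  have hrowfilter : List.filter
        ((fun x => !pvRowBlank g x (List.map (fun k : Nat => (↑k : Int)) (List.range g.length)))
          ∘ fun k : Nat => (↑k : Int)) (List.range g.length)
      = (List.range g.length).filter (pvRowKeepW g) := by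
    refine List.filter_congr ?_
    intro r _
    show (!pvRowBlank g (↑r) _) = pvRowKeepW g r
    rw [pvRowBlank_eq_all, List.all_map]
    have h2 : ((fun c => pvCell g (↑r) c == " ") ∘ fun k : Nat => (↑k : Int))
        = fun c : Nat => ((g.getD r []).getD c "" == " ") := by
      funext c; simp only [Function.comp, hcell]
    rw [h2, List.not_all_eq_any_not]
    rfl
  rw [hrowfilter]
  have hmapfun : ∀ r ∈ (List.range g.length).filter (pvRowKeepW g),
      ((fun x => List.map (pvCell g x ∘ fun k : Nat => (↑k : Int))
          (List.filter ((fun x => !pvColBlank g x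
                (List.map (fun k : Nat => (↑k : Int)) (List.range g.length)))
            ∘ fun k : Nat => (↑k : Int)) (List.range g.length)))
        ∘ fun k : Nat => (↑k : Int)) r
      = ((List.range g.length).filter (pvKeepColW g)).map (fun c => (g.getD r []).getD c "") := by
    intro r _
    show List.map (pvCell g (↑r) ∘ fun k : Nat => (↑k : Int)) _ = _
    rw [hkeep]
    refine List.map_congr_left ?_
    intro c _
    exact hcell r c
  rw [List.map_congr_left hmapfun]
  rfl

lemma pvB_eq_canon (g : List (List String)) (hpre : Pre_strip_piece g) :
    strip_piece_alt g = pvCanonW g := by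
  obtain ⟨h1, h2, _⟩ := hpre
  simp only [strip_piece_alt, PySem.List.len_eq]
  have hslice : ∀ row : List String,
      PySem.List.slice row none (some (g.length : Int)) = row.take g.length := by
    intro row; exact PySem.List.slice_to_natCast row g.length
  simp only [hslice]
  set p : List String → Bool := fun row => (row.take g.length).any (fun cell => cell != " ")
    with hp
  set K := g.filter p with hK
  -- the canonical form of A, re-expressed over the kept rows K
  have hrowpred : ∀ row ∈ g, pvQn g row = p row := by
    intro row hrow
    by_cases hlen : g.length ≤ row.length
    · unfold pvQn
      have htk : (row.take g.length).length = g.length := by simp [hlen]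
      calc (List.range g.length).any (fun c => row.getD c "" != " ")
          = (List.range g.length).any (fun c => (row.take g.length).getD c "" != " ") := by
            refine pvAnyCongr _ _ _ ?_
            intro c hc
            have hc' : c < g.length := List.mem_range.mp hc
            rw [List.getD_eq_getElem row _ (by omega),
              List.getD_eq_getElem (row.take g.length) _ (by rw [htk]; omega),
              List.getElem_take]
        _ = (List.range (row.take g.length).length).any
              (fun c => (row.take g.length).getD c "" != " ") := by rw [htk]
        _ = (row.take g.length).any (fun cell => cell != " ") :=
            pvAnyRange (row.take g.length) "" (fun cell => cell != " ")
    · have hlt : row.length < g.length := by omega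
      have hqn : pvQn g row = true := by
        unfold pvQn
        rw [List.any_eq_true]
        refine ⟨row.length, List.mem_range.mpr hlt, ?_⟩
        rw [List.getD_eq_default _ _ le_rfl]
        decide
      have hpr : p row = true := by
        show (row.take g.length).any (fun cell => cell != " ") = true
        rw [List.take_of_length_le (by omega)]
        rcases h1 row hrow with h | h
        · omega
        · exact h
      rw [hqn, hpr]
  have hACanon : pvCanonW g
      = K.map (fun row =>
          ((List.range g.length).filter (pvKeepColW g)).map (fun c => row.getD c "")) := by
    unfold pvCanonW
    have hsplit : ((List.range g.length).filter (pvRowKeepW g)).map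
          (fun r => ((List.range g.length).filter (pvKeepColW g)).map
            (fun c => (g.getD r []).getD c ""))
        = (((List.range g.length).filter (fun r => pvQn g (g.getD r []))).map
            (fun r => g.getD r [])).map
          (fun row => ((List.range g.length).filter (pvKeepColW g)).map
            (fun c => row.getD c "")) := by
      rw [List.map_map]; rfl
    rw [hsplit, pvFilterMapRange g [] (pvQn g), List.filter_congr hrowpred, ← hK]
  have hidx : ∀ r ∈ K, ∃ i < g.length, g.getD i [] = r := by
    intro r hr
    have hrg : r ∈ g := by rw [hK] at hr; exact (List.mem_filter.mp hr).1
    obtain ⟨i, hi, heq⟩ := List.mem_iff_getElem.mp hrg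
    exact ⟨i, hi, by rw [List.getD_eq_getElem _ _ hi, heq]⟩
  -- every column the canonical form keeps has a genuinely non-blank cell in a kept row
  have hgenuine : ∀ c < g.length, pvKeepColW g c = true →
      ∃ r ∈ K, c < r.length ∧ r.getD c "" ≠ " " := by
    intro c hc hcol
    unfold pvKeepColW at hcol
    rw [List.any_eq_true] at hcol
    obtain ⟨i, hi, hne⟩ := hcol
    have hi' : i < g.length := List.mem_range.mp hi
    rw [bne_iff_ne] at hne
    -- reduce to a genuinely in-range non-blank cell, via Pre_ clause (2) if needed
    have hcase : ∃ j < g.length, c < (g.getD j []).length ∧ (g.getD j []).getD c "" ≠ " " := by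
      by_cases hclen : c < (g.getD i []).length
      · exact ⟨i, hi', hclen, hne⟩
      · obtain ⟨j, hj, hcj, hnbj⟩ := h2 c hc i hi' (by omega)
        exact ⟨j, by omega, hcj, hnbj⟩
    obtain ⟨j, hj, hcj, hnbj⟩ := hcase
    refine ⟨g.getD j [], ?_, hcj, hnbj⟩
    rw [hK, List.mem_filter]
    have hmem : g.getD j [] ∈ g := by
      rw [List.getD_eq_getElem _ _ hj]; exact List.getElem_mem _
    refine ⟨hmem, ?_⟩
    show ((g.getD j []).take g.length).any (fun cell => cell != " ") = true
    rw [List.any_eq_true]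
    refine ⟨(g.getD j []).getD c "", ?_, by simpa using hnbj⟩
    rw [List.getD_eq_getElem _ _ hcj, List.mem_take_iff_getElem]
    exact ⟨c, by omega, rfl⟩
  -- the column-major read of the kept rows, as plain Nat indexing
  have hcols : (PySem.List.pyRange 0 ((g.length : Nat) : Int) 1).map
        (fun c => K.map (fun row => PySem.List.pyGetD row c ""))
      = (List.range g.length).map (fun c => K.map (fun row => row.getD c "")) := by
    rw [pvRng_eq, List.map_map]
    refine List.map_congr_left ?_
    intro c _
    simp only [Function.comp]
    refine List.map_congr_left ?_
    intro row _
    exact PySem.List.pyGetD_natCast row c ""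
  rw [hcols, List.filter_map]
  -- the column filter picks out exactly the canonical kept columns
  have hpred : List.filter
        ((fun col => col.any (fun cell => cell != " ")) ∘
          fun c => K.map (fun row => row.getD c ""))
        (List.range g.length)
      = (List.range g.length).filter (pvKeepColW g) := by
    refine List.filter_congr ?_
    intro c hc
    have hc' : c < g.length := List.mem_range.mp hc
    show (K.map (fun row => row.getD c "")).any (fun cell => cell != " ") = pvKeepColW g c
    rw [List.any_map]
    rw [Bool.eq_iff_iff, List.any_eq_true]
    constructor
    · rintro ⟨r, hr, hnb⟩
      obtain ⟨i, hi, heq⟩ := hidx r hr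
      unfold pvKeepColW
      rw [List.any_eq_true]
      exact ⟨i, List.mem_range.mpr hi, by rw [heq]; exact hnb⟩
    · intro hcol
      obtain ⟨r, hr, _, hnb⟩ := hgenuine c hc' hcol
      exact ⟨r, hr, by simpa using hnb⟩
  rw [hpred]
  set C := (List.range g.length).filter (pvKeepColW g) with hC
  -- read the rows back out of the kept columns
  have hfinal : (PySem.List.pyRange 0 ((K.length : Nat) : Int) 1).map
        (fun r => (C.map (fun c => K.map (fun row => row.getD c ""))).map
          (fun col => PySem.List.pyGetD col r ""))
      = K.map (fun row => C.map (fun c => row.getD c "")) := by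
    rw [pvRng_eq, List.map_map]
    have hstep : ∀ r ∈ List.range K.length,
        ((fun r : Int => (C.map (fun c => K.map (fun row => row.getD c ""))).map
            (fun col => PySem.List.pyGetD col r "")) ∘ fun k : Nat => ((k : Nat) : Int)) r
          = C.map (fun c => (K.getD r []).getD c "") := by
      intro r hr
      have hr' : r < K.length := List.mem_range.mp hr
      show (C.map (fun c => K.map (fun row => row.getD c ""))).map
          (fun col => PySem.List.pyGetD col ((r : Nat) : Int) "") = _
      rw [List.map_map]
      refine List.map_congr_left ?_
      intro c _
      simp only [Function.comp]
      rw [PySem.List.pyGetD_natCast,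
        List.getD_eq_getElem (K.map _) _ (by simp [hr']), List.getElem_map,
        List.getD_eq_getElem K _ hr']
    rw [List.map_congr_left hstep]
    exact pvMapGetDRange K [] (fun row => C.map (fun c => row.getD c ""))
  rw [hfinal, hACanon]

-- ===== VERDICT (by name: the statement is the Claim_ definition above) =====
theorem strip_piece_spec : Claim_equal_strip_piece := by
  intro g _ hpre
  unfold Spec_strip_piece
  rw [pvA_eq_canon g, pvB_eq_canon g hpre]
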